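-- pv_equiv track=rewrite | github.com/mfagerlund/rectangular-surface-parameterization | scripts/install_pyqex.py | find_matching_wheel
-- ===== SOURCE A (Python) =====
-- def find_matching_wheel(release, python_tag, platform_tag):
--     """Find a wheel matching the current Python and platform."""
--     assets = release.get("assets", [])
--
--     # Try exact match first
--     for asset in assets:
--         name = asset["name"]
--         if name.endswith(".whl"):
--             if python_tag in name and platform_tag in name:
--                 return asset["browser_download_url"], name
--
--     # Try partial platform match (for manylinux variations)
--     platform_base = platform_tag.split(".")[0] if "." in platform_tag else platform_tag
--     for asset in assets:
--         name = asset["name"]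
--         if name.endswith(".whl"):
--             if python_tag in name and platform_base in name:
--                 return asset["browser_download_url"], name
--
--     return None, None
-- ===== SOURCE B (Python) =====
-- def find_matching_wheel(release, python_tag, platform_tag):
--     """Find a wheel matching the current Python and platform.
--
--     Single pass over the assets: return the first exact (platform_tag) match
--     immediately; remember the first partial-only (platform_base) match and
--     fall back to it after the scan."""
--     platform_base = platform_tag.split(".")[0] if "." in platform_tag else platform_tag
--     partial = None
--     for asset in release.get("assets", []):
--         name = asset["name"]
--         if not name.endswith(".whl") or python_tag not in name:
--             continue
--         if platform_tag in name:
--             return asset["browser_download_url"], name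
--         if partial is None and platform_base in name:
--             partial = (asset["browser_download_url"], name)
--     return partial if partial is not None else (None, None)
-- ===== Notes on version B (the rewrite author's own statement) =====
-- stated objective: alternative
-- what changed: B makes a single pass over the assets, returning the first exact platform_tag match immediately and remembering the first partial-only platform_base match as a fallback, instead of A's two full scans over the asset list.
import Mathlib
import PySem

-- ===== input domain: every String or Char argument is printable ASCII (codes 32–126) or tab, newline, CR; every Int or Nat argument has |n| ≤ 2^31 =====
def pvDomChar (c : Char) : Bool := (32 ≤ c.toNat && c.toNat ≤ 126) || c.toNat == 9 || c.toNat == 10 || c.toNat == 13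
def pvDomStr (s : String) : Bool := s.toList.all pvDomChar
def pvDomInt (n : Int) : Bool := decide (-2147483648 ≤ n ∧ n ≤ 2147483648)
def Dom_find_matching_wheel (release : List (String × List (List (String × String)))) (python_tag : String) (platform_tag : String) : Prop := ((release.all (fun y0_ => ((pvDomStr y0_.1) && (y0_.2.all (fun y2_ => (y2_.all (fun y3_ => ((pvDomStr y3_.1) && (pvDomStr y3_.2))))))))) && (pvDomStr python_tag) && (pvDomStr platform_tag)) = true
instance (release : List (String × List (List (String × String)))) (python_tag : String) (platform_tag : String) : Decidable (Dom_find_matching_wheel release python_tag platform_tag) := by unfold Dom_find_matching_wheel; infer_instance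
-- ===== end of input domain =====

-- B replaces A's two full scans over the assets with one pass that returns the first
-- exact match immediately and remembers the first partial-only match as a fallback
-- (alternative decomposition; same value on every input admitted by Pre_).


-- ===== PORT A =====
-- shared primitives (dict access, exact as Python's on inputs admitted by Pre_, where the keys exist)
def fmwGet (d : List (String × String)) (k : String) : String :=
  ((d.find? (fun kv => kv.1 == k)).map (·.2)).getD ""

def fmwAssets (release : List (String × List (List (String × String)))) : List (List (String × String)) :=
  ((release.find? (fun kv => kv.1 == "assets")).map (·.2)).getD []

-- platform_base = platform_tag.split(".")[0] if "." in platform_tag else platform_tag (same line in A and B)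
def fmwBase (platform_tag : String) : String :=
  if PySem.Str.isIn "." platform_tag then
    PySem.List.pyGetD ((PySem.Str.split? platform_tag ".").getD []) 0 ""
  else platform_tag

-- the loop-body test of A's two loops: name ends with ".whl" and both tags occur in it
def fmwMatch (python_tag tag : String) (asset : List (String × String)) : Bool :=
  let name := fmwGet asset "name"
  PySem.Str.endswith name ".whl" && (PySem.Str.isIn python_tag name && PySem.Str.isIn tag name)

def find_matching_wheel (release : List (String × List (List (String × String)))) (python_tag : String) (platform_tag : String) : Option String × Option String :=
  let assets := fmwAssets release
  match assets.find? (fmwMatch python_tag platform_tag) with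
  | some asset => (some (fmwGet asset "browser_download_url"), some (fmwGet asset "name"))
  | none =>
    match assets.find? (fmwMatch python_tag (fmwBase platform_tag)) with
    | some asset => (some (fmwGet asset "browser_download_url"), some (fmwGet asset "name"))
    | none => (none, none)

-- ===== PORT B =====
def fmwLoopB (python_tag platform_tag platform_base : String)
    (part : Option (String × String)) : List (List (String × String)) → Option String × Option String
  | [] =>
    match part with
    | some p => (some p.1, some p.2)
    | none => (none, none)
  | asset :: rest =>
    let name := fmwGet asset "name"
    if !PySem.Str.endswith name ".whl" || !PySem.Str.isIn python_tag name then
      fmwLoopB python_tag platform_tag platform_base part rest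
    else if PySem.Str.isIn platform_tag name then
      (some (fmwGet asset "browser_download_url"), some name)
    else if part.isNone && PySem.Str.isIn platform_base name then
      fmwLoopB python_tag platform_tag platform_base (some (fmwGet asset "browser_download_url", name)) rest
    else
      fmwLoopB python_tag platform_tag platform_base part rest

def find_matching_wheel_alt (release : List (String × List (List (String × String)))) (python_tag : String) (platform_tag : String) : Option String × Option String :=
  fmwLoopB python_tag platform_tag (fmwBase platform_tag) none (fmwAssets release)

-- ===== PRECONDITION & SPEC =====
-- Pre_ excludes releases containing a malformed asset dict (one without a "name" or
-- "browser_download_url" key), on which A raises KeyError unless an earlier asset matched.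
def Pre_find_matching_wheel (release : List (String × List (List (String × String)))) (python_tag : String) (platform_tag : String) : Prop :=
  ∀ asset ∈ fmwAssets release,
    (asset.find? (fun kv => kv.1 == "name")).isSome = true ∧
    (asset.find? (fun kv => kv.1 == "browser_download_url")).isSome = true

instance (release : List (String × List (List (String × String)))) (python_tag : String) (platform_tag : String) : Decidable (Pre_find_matching_wheel release python_tag platform_tag) := by unfold Pre_find_matching_wheel; infer_instance

def pvWitness_find_matching_wheel : (List (String × List (List (String × String)))) × String × String :=
  ([("assets", [[("name", "pkg-cp39-linux_x86_64.whl"), ("browser_download_url", "http://u")]])], "cp39", "linux_x86_64")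

def Spec_find_matching_wheel (release : List (String × List (List (String × String)))) (python_tag : String) (platform_tag : String) (out : Option String × Option String) : Prop := out = find_matching_wheel_alt release python_tag platform_tag
instance (release : List (String × List (List (String × String)))) (python_tag : String) (platform_tag : String) (out : Option String × Option String) : Decidable (Spec_find_matching_wheel release python_tag platform_tag out) := by unfold Spec_find_matching_wheel; infer_instance

-- ===== CLAIM (what is proved, stated in full; the proofs are below) =====
def Claim_equal_find_matching_wheel : Prop := ∀ (release : List (String × List (List (String × String)))) (python_tag : String) (platform_tag : String), Dom_find_matching_wheel release python_tag platform_tag → Pre_find_matching_wheel release python_tag platform_tag → Spec_find_matching_wheel release python_tag platform_tag (find_matching_wheel release python_tag platform_tag)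

-- ===== LEMMAS AND PROOFS =====

theorem fmwLoopB_spec (python_tag platform_tag platform_base : String)
    (assets : List (List (String × String))) (part : Option (String × String)) :
    fmwLoopB python_tag platform_tag platform_base part assets =
      match assets.find? (fmwMatch python_tag platform_tag) with
      | some asset => (some (fmwGet asset "browser_download_url"), some (fmwGet asset "name"))
      | none =>
        match part with
        | some p => (some p.1, some p.2)
        | none =>
          match assets.find? (fmwMatch python_tag platform_base) with
          | some asset => (some (fmwGet asset "browser_download_url"), some (fmwGet asset "name"))
          | none => (none, none) := by
  induction assets generalizing part with
  | nil => cases part <;> simp [fmwLoopB]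
  | cons asset rest ih =>
    by_cases hw : PySem.Chars.endswith (fmwGet asset "name").toList ['.', 'w', 'h', 'l'] = true <;>
      by_cases hpy : PySem.Str.isIn python_tag (fmwGet asset "name") = true <;>
        by_cases hpl : PySem.Str.isIn platform_tag (fmwGet asset "name") = true <;>
          by_cases hb : PySem.Str.isIn platform_base (fmwGet asset "name") = true <;>
            simp only [Bool.not_eq_true] at hw hpy hpl hb <;>
              simp only [PySem.Str.isIn_eq] at hpy hpl hb <;>
                cases part <;>
                  simp [fmwLoopB, fmwMatch, hw, hpy, hpl, hb, ih]

-- ===== VERDICT (by name: the statement is the Claim_ definition above) =====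
theorem find_matching_wheel_spec : Claim_equal_find_matching_wheel := by
  intro release python_tag platform_tag _ _
  unfold Spec_find_matching_wheel find_matching_wheel find_matching_wheel_alt
  rw [fmwLoopB_spec]
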